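-- pv_equiv track=rewrite | github.com/Svenskithesource/pySpy | editor.py | calculate_extended_args
-- ===== SOURCE A (Python) =====
-- def calculate_extended_args(arg):
--     extended_args = []
--     new_arg = arg
--     if arg > 255:
--         extended_arg = arg >> 8
--         while True:
--             if extended_arg > 255:
--                 extended_arg -= 255
--                 extended_args.append(255)
--             else:
--                 extended_args.append(extended_arg)
--                 break
--
--         new_arg = arg % 256
--     return extended_args, new_arg
-- ===== SOURCE B (Python) =====
-- def calculate_extended_args(arg):
--     if arg <= 255:
--         return [], arg
--     e = arg >> 8
--     k = (e - 1) // 255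
--     return [255] * k + [e - 255 * k], arg % 256
-- ===== Notes on version B (the rewrite author's own statement) =====
-- stated objective: simpler
-- what changed: Replaces the repeated-subtraction while-loop with a closed-form count of extended-arg bytes and a single list construction.
import Mathlib
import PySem

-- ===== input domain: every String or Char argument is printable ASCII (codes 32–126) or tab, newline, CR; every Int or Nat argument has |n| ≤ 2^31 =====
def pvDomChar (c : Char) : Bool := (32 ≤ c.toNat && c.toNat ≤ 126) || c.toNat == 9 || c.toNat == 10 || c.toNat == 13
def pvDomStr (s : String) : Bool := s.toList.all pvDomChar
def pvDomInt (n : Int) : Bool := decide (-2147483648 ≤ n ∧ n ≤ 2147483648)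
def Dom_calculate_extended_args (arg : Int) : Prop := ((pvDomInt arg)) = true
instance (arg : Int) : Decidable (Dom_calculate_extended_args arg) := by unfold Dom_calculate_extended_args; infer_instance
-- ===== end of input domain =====

-- B replaces A's subtract-255 while-loop by a closed-form count of 255-bytes; objective: simpler.


-- ===== PORT A =====
-- the 'while True' loop: subtract 255 and append 255 while extended_arg > 255, then append it
def pvLoopA (extended_arg : Int) (extended_args : List Int) : List Int :=
  if extended_arg > 255 then pvLoopA (extended_arg - 255) (extended_args ++ [255])
  else extended_args ++ [extended_arg]
termination_by extended_arg.toNat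
decreasing_by omega

def calculate_extended_args (arg : Int) : List Int × Int :=
  if arg > 255 then
    -- 'arg >> 8' on a Python int is floor division by 2^8 (exact for every int)
    (pvLoopA (PySem.Int.floordiv arg 256) [], PySem.Int.mod arg 256)
  else ([], arg)

-- ===== PORT B =====
def calculate_extended_args_alt (arg : Int) : List Int × Int :=
  if arg ≤ 255 then ([], arg)
  else
    let e := PySem.Int.floordiv arg 256   -- 'arg >> 8'
    let k := PySem.Int.floordiv (e - 1) 255
    (List.replicate k.toNat 255 ++ [e - 255 * k], PySem.Int.mod arg 256)

-- ===== PRECONDITION & SPEC =====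
def Spec_calculate_extended_args (arg : Int) (out : List Int × Int) : Prop := out = calculate_extended_args_alt arg
instance (arg : Int) (out : List Int × Int) : Decidable (Spec_calculate_extended_args arg out) := by unfold Spec_calculate_extended_args; infer_instance

-- ===== CLAIM (what is proved, stated in full; the proofs are below) =====
def Claim_equal_calculate_extended_args : Prop := ∀ (arg : Int), Dom_calculate_extended_args arg → Spec_calculate_extended_args arg (calculate_extended_args arg)

-- ===== LEMMAS AND PROOFS =====

-- loop invariant: for e ≥ 1 the loop appends ⌊(e-1)/255⌋ copies of 255 and then the remainder
theorem pvLoopA_closed : ∀ (n : Nat) (e : Int) (acc : List Int), e.toNat = n → 1 ≤ e →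
    pvLoopA e acc = acc ++ (List.replicate ((e - 1) / 255).toNat 255 ++ [e - 255 * ((e - 1) / 255)]) := by
  intro n
  induction n using Nat.strong_induction_on with
  | _ n ih =>
    intro e acc hn he
    unfold pvLoopA
    by_cases h : e > 255
    · simp only [if_pos h]
      rw [ih (e - 255).toNat (by omega) (e - 255) (acc ++ [255]) rfl (by omega)]
      have hk : (e - 1) / 255 = (e - 255 - 1) / 255 + 1 := by omega
      have hk0 : 0 ≤ (e - 255 - 1) / 255 := by omega
      rw [hk]
      have : ((e - 255 - 1) / 255 + 1).toNat = ((e - 255 - 1) / 255).toNat + 1 := by omega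
      rw [this, List.replicate_succ]
      simp only [List.append_assoc, List.cons_append, List.nil_append]
      ring_nf
    · simp only [if_neg h]
      have : (e - 1) / 255 = 0 := by omega
      simp [this]

theorem calculate_extended_args_spec : Claim_equal_calculate_extended_args := by
  intro arg _
  unfold Spec_calculate_extended_args calculate_extended_args calculate_extended_args_alt
  by_cases h : arg > 255
  · simp only [if_pos h, if_neg (by omega : ¬ arg ≤ 255)]
    have he : 1 ≤ PySem.Int.floordiv arg 256 := by
      rw [PySem.Int.floordiv_eq_ediv_of_pos (by omega)]; omega
    rw [pvLoopA_closed (PySem.Int.floordiv arg 256).toNat _ [] rfl he]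
    rw [PySem.Int.floordiv_eq_ediv_of_pos (b := 255) (by omega)]
    simp
  · simp only [if_neg h, if_pos (by omega : arg ≤ 255)]
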